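-- pv_equiv track=rewrite | github.com/jiahaoxiang2000/MILP | example/LBlock.py | getKeyStateAtRound
-- ===== SOURCE A (Python) =====
-- KEY_SIZE = 80
--
-- WORD_SIZE = 4
--
-- def getKeyStateAtRound(r):
--     keycounter = 0
--     if r == 1:
--         return ["k" + str(i) for i in range(0, KEY_SIZE)]
--     else:
--         tempState = getKeyStateAtRound(r - 1)
--         newState = ["" for i in range(0, KEY_SIZE)]
--         for i in range(0, KEY_SIZE):
--             newState[i] = tempState[(i + 29) % KEY_SIZE]
--         assert len(newState) == KEY_SIZE
--         if r >= 2: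
--             newState[0] = "vInSbox" + str((r - 2) * WORD_SIZE * 2 + 0)
--             newState[1] = "vInSbox" + str((r - 2) * WORD_SIZE * 2 + 1)
--             newState[2] = "vInSbox" + str((r - 2) * WORD_SIZE * 2 + 2)
--             newState[3] = "vInSbox" + str((r - 2) * WORD_SIZE * 2 + 3)
--             newState[4] = "vInSbox" + str((r - 2) * WORD_SIZE * 2 + 4)
--             newState[5] = "vInSbox" + str((r - 2) * WORD_SIZE * 2 + 5)
--             newState[6] = "vInSbox" + str((r - 2) * WORD_SIZE * 2 + 6)
--             newState[7] = "vInSbox" + str((r - 2) * WORD_SIZE * 2 + 7)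
--         return newState
-- ===== SOURCE B (Python) =====
-- KEY_SIZE = 80
--
-- WORD_SIZE = 4
--
-- def getKeyStateAtRound(r):
--     # Closed form per slot: trace each slot back through the 29-rotation until it
--     # hits a vInSbox overwrite (indices 0..7) or bottoms out at round 1.
--     out = []
--     for i in range(KEY_SIZE):
--         s = next(t for t in range(KEY_SIZE) if (i + 29 * t) % KEY_SIZE < 8)
--         if r - 2 >= s:
--             out.append("vInSbox" + str((r - s - 2) * WORD_SIZE * 2 + (i + 29 * s) % KEY_SIZE))
--         else:
--             out.append("k" + str((i + 29 * (r - 1)) % KEY_SIZE))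
--     return out
-- ===== Notes on version B (the rewrite author's own statement) =====
-- stated objective: faster
-- what changed: Replaces A's round-by-round recursion (rebuilding and rotating the whole 80-slot state r times) by a per-slot closed form: each slot's label is found directly from the first backward 29-rotation step that lands in the overwritten window 0..7.
import Mathlib
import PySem

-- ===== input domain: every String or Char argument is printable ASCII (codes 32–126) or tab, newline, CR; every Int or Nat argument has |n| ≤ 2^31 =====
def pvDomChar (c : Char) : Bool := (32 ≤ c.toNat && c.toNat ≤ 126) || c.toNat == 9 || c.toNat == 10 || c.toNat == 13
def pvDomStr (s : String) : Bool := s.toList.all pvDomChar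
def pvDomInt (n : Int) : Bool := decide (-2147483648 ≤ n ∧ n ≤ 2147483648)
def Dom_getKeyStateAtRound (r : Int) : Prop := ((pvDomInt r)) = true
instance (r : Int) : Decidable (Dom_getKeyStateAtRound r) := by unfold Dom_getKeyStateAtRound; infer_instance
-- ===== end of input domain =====

-- B replaces A's round-by-round recursion by a per-slot closed form
-- (first backward rotation step landing in the overwritten window 0..7).


-- ===== PORT A =====
-- Literal transliteration of A: recursion on r, rotate by 29, overwrite slots 0..7.
-- The `r < 1` guard returns [] only to make the function total: Python recurses
-- without a base case (RecursionError) there; those inputs are excluded by Pre_.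
def getKeyStateAtRound (r : Int) : List String :=
  if r = 1 then
    (List.range 80).map (fun i => "k" ++ PySem.Int.toStr (i : Int))
  else if r < 1 then []
  else
    let tempState := getKeyStateAtRound (r - 1)
    -- newState[i] = tempState[(i + 29) % KEY_SIZE]; the index is always in range, getD "" mirrors the "" initialisation
    let newState := (List.range 80).map (fun i => tempState.getD ((i + 29) % 80) "")
    if r ≥ 2 then
      ((((((((newState.set 0 ("vInSbox" ++ PySem.Int.toStr ((r - 2) * 4 * 2 + 0))).set
        1 ("vInSbox" ++ PySem.Int.toStr ((r - 2) * 4 * 2 + 1))).set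
        2 ("vInSbox" ++ PySem.Int.toStr ((r - 2) * 4 * 2 + 2))).set
        3 ("vInSbox" ++ PySem.Int.toStr ((r - 2) * 4 * 2 + 3))).set
        4 ("vInSbox" ++ PySem.Int.toStr ((r - 2) * 4 * 2 + 4))).set
        5 ("vInSbox" ++ PySem.Int.toStr ((r - 2) * 4 * 2 + 5))).set
        6 ("vInSbox" ++ PySem.Int.toStr ((r - 2) * 4 * 2 + 6))).set
        7 ("vInSbox" ++ PySem.Int.toStr ((r - 2) * 4 * 2 + 7)))
    else newState
termination_by r.toNat
decreasing_by omega

-- ===== PORT B =====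
-- Python: s = next(t for t in range(80) if (i + 29*t) % 80 < 8); the generator always
-- yields (29 is invertible mod 80), so .getD 0 is only a totality guard.
def pvFirstHit (i : Nat) : Nat :=
  (((List.range 80).find? (fun t => decide ((i + 29 * t) % 80 < 8))).getD 0)

-- loop body of Source B (one output slot)
def pvSlot (r : Int) (i : Nat) : String :=
  let s := pvFirstHit i
  if r - 2 ≥ (s : Int) then
    "vInSbox" ++ PySem.Int.toStr ((r - (s : Int) - 2) * 4 * 2 + (((i + 29 * s) % 80 : Nat) : Int))
  else
    "k" ++ PySem.Int.toStr (PySem.Int.mod ((i : Int) + 29 * (r - 1)) 80)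

def getKeyStateAtRound_alt (r : Int) : List String :=
  (List.range 80).map (fun i => pvSlot r i)

-- ===== PRECONDITION & SPEC =====
-- A recurses on r - 1 with base case r == 1 only, so Python raises RecursionError
-- for every r ≤ 0; exactly those inputs are excluded.
def Pre_getKeyStateAtRound (r : Int) : Prop := 1 ≤ r
instance (r : Int) : Decidable (Pre_getKeyStateAtRound r) := by unfold Pre_getKeyStateAtRound; infer_instance
def pvWitness_getKeyStateAtRound : Int := (3)

def Spec_getKeyStateAtRound (r : Int) (out : List String) : Prop := out = getKeyStateAtRound_alt r
instance (r : Int) (out : List String) : Decidable (Spec_getKeyStateAtRound r out) := by unfold Spec_getKeyStateAtRound; infer_instance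

-- ===== CLAIM (what is proved, stated in full; the proofs are below) =====
def Claim_equal_getKeyStateAtRound : Prop := ∀ (r : Int), Dom_getKeyStateAtRound r → Pre_getKeyStateAtRound r → Spec_getKeyStateAtRound r (getKeyStateAtRound r)

-- ===== LEMMAS AND PROOFS =====

-- slots 0..7 are hit immediately
lemma pvFirstHit_lt8 : ∀ i : Fin 80, i.val < 8 → pvFirstHit i.val = 0 := by decide

-- one backward rotation step adds one to the first-hit distance
lemma pvFirstHit_step : ∀ i : Fin 80, 8 ≤ i.val → pvFirstHit i.val = pvFirstHit ((i.val + 29) % 80) + 1 := by decide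

lemma pvSlot_lt8 (r : Int) (i : Nat) (h : i < 8) (hr : 2 ≤ r) :
    pvSlot r i = "vInSbox" ++ PySem.Int.toStr ((r - 2) * 4 * 2 + (i : Int)) := by
  have h0 : pvFirstHit i = 0 := pvFirstHit_lt8 ⟨i, by omega⟩ h
  simp only [pvSlot, h0]
  rw [if_pos (by omega)]
  congr 2
  have : (i + 29 * 0) % 80 = i := by omega
  rw [this]; ring

lemma pvSlot_step (r : Int) (i : Nat) (h8 : 8 ≤ i) (h80 : i < 80) :
    pvSlot (r - 1) ((i + 29) % 80) = pvSlot r i := by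
  have hs : pvFirstHit i = pvFirstHit ((i + 29) % 80) + 1 := pvFirstHit_step ⟨i, h80⟩ h8
  simp only [pvSlot, hs]
  set s := pvFirstHit ((i + 29) % 80) with hsdef
  by_cases hc : r - 1 - 2 ≥ (s : Int)
  · rw [if_pos hc, if_pos (by push_cast; omega)]
    congr 2
    have hm : ((i + 29) % 80 + 29 * s) % 80 = (i + 29 * (s + 1)) % 80 := by omega
    rw [hm]; push_cast; ring
  · rw [if_neg hc, if_neg (by push_cast at hc ⊢; omega)]
    congr 2
    rw [PySem.Int.mod_eq_emod_of_pos (by norm_num), PySem.Int.mod_eq_emod_of_pos (by norm_num)]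
    have : (((i + 29) % 80 : Nat) : Int) = ((i : Int) + 29) % 80 := by push_cast; ring_nf
    omega

lemma pvMain : ∀ n : Nat, getKeyStateAtRound ((n : Int) + 1) = getKeyStateAtRound_alt ((n : Int) + 1) := by
  intro n
  induction n with
  | zero =>
      rw [getKeyStateAtRound]
      norm_num
      decide
  | succ m ih =>
      push_cast
      have hr1 : ((m : Int) + 1 + 1) ≠ 1 := by omega
      have hr2 : ¬ ((m : Int) + 1 + 1) < 1 := by omega
      have hr3 : ((m : Int) + 1 + 1) ≥ 2 := by omega
      rw [getKeyStateAtRound, if_neg hr1, if_neg hr2, if_pos hr3]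
      have hsub : ((m : Int) + 1 + 1) - 1 = (m : Int) + 1 := by ring
      rw [hsub, ih]
      apply List.ext_getElem
      · simp [getKeyStateAtRound_alt]
      · intro i h1 h2
        have hi : i < 80 := by simpa [getKeyStateAtRound_alt] using h2
        simp only [getKeyStateAtRound_alt, List.getElem_set, List.getElem_map, List.getElem_range]
        by_cases h8 : i < 8
        · interval_cases i <;>
            simp only [reduceIte] <;>
            rw [pvSlot_lt8 _ _ (by omega) hr3] <;> norm_num
        · rw [if_neg (by omega), if_neg (by omega), if_neg (by omega), if_neg (by omega),
             if_neg (by omega), if_neg (by omega), if_neg (by omega), if_neg (by omega)]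
          have hj : (i + 29) % 80 < 80 := by omega
          rw [List.getD_eq_getElem _ _ (by simpa [getKeyStateAtRound_alt] using hj)]
          simp only [List.getElem_map, List.getElem_range]
          have := pvSlot_step ((m : Int) + 1 + 1) i (by omega) hi
          simpa [hsub] using this

-- ===== VERDICT (by name: the statement is the Claim_ definition above) =====
theorem getKeyStateAtRound_spec : Claim_equal_getKeyStateAtRound := by
  intro r _ hpre
  unfold Spec_getKeyStateAtRound
  have hn : ((r - 1).toNat : Int) + 1 = r := by unfold Pre_getKeyStateAtRound at hpre; omega
  calc getKeyStateAtRound r = getKeyStateAtRound (((r - 1).toNat : Int) + 1) := by rw [hn]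
    _ = getKeyStateAtRound_alt (((r - 1).toNat : Int) + 1) := pvMain _
    _ = getKeyStateAtRound_alt r := by rw [hn]
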